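-- pv_equiv track=rewrite | github.com/prius/learning | l33tcode/k-diff-pairs-in-an-array.py | findPairs1
-- ===== SOURCE A (Python) =====
-- def findPairs1(nums, k):
--     """
--     :type nums: List[int]
--     :type k: int
--     :rtype: int
--     """
--     pairs = []
--     nums.sort()
--
--     pos_new = 0
--
--     for pos in range(len(nums)):
--         pos_new = pos if pos_new < pos else pos_new # Skip values that
--                                                     # certainly on less than
--                                                     # k distance
--         for pos2 in range(pos_new + 1, len(nums)):
--             diff = nums[pos2] - nums[pos]
--             if diff > k:
--                 break
--             elif diff == k:
--                 pairs.append((nums[pos], nums[pos2]))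
--                 pos_new = pos2
--
--     return len(set(pairs))
-- ===== SOURCE B (Python) =====
-- def findPairs1(nums, k):
--     if k < 0:
--         return 0
--     counts = {}
--     for x in nums:
--         counts[x] = counts.get(x, 0) + 1
--     if k == 0:
--         return sum(1 for c in counts.values() if c >= 2)
--     return sum(1 for x in counts if x + k in counts)
-- ===== Notes on version B (the rewrite author's own statement) =====
-- stated objective: faster
-- what changed: Replaced the sort plus nested index scan with skip-pointer by a single hash-counter pass: k<0 returns 0, k==0 counts values occurring at least twice, k>0 counts distinct values v with v+k present.
import Mathlib
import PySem

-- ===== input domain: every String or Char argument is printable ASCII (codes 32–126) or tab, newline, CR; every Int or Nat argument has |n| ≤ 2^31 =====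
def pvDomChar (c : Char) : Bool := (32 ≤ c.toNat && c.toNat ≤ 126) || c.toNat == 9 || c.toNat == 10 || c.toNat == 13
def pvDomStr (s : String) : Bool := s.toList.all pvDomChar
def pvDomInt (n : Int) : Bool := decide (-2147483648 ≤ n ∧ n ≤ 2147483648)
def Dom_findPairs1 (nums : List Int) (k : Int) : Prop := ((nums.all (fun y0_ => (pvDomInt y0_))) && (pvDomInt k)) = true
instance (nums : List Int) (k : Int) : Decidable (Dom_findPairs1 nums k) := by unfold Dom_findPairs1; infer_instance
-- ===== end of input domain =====

-- B replaces A's sort + nested skip-pointer scan by one counting-dict pass (asymptotically faster by the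
-- timing run); A sorts `nums` in place — the equivalence proved here is about the RETURN value only.

-- ===== PORT A =====
-- inner 'for pos2 in range(pn+1, len(s))' loop; cnt = number of remaining indices, j = pos2.
-- Indices j and pos always come from range(len(s)), so they are in range and `getD` is exact here.
def pvInnerA (s : List Int) (k : Int) (pos : Nat) (j : Nat) (pairs : List (Int × Int)) (pn : Nat)
    (cnt : Nat) : List (Int × Int) × Nat :=
  match cnt with
  | 0 => (pairs, pn)
  | Nat.succ c =>
    let diff := s.getD j 0 - s.getD pos 0
    if k < diff then (pairs, pn)                    -- break
    else if diff = k then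
      pvInnerA s k pos (j+1) (pairs ++ [(s.getD pos 0, s.getD j 0)]) j c
    else pvInnerA s k pos (j+1) pairs pn c

-- outer 'for pos in range(len(s))' loop, state (pairs, pos_new)
def pvOuterA (s : List Int) (k : Int) (ps : List Nat) (pairs : List (Int × Int)) (pn : Nat) :
    List (Int × Int) × Nat :=
  match ps with
  | [] => (pairs, pn)
  | pos :: rest =>
    let pn1 := if pn < pos then pos else pn
    let r := pvInnerA s k pos (pn1+1) pairs pn1 (s.length - (pn1+1))
    pvOuterA s k rest r.1 r.2

def findPairs1 (nums : List Int) (k : Int) : Int :=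
  let s := PySem.List.sorted nums (fun x => x) false
  ((PySem.Set.ofList (pvOuterA s k (List.range s.length) [] 0).1).length : Int)

-- ===== PORT B =====
def findPairs1_alt (nums : List Int) (k : Int) : Int :=
  if k < 0 then 0
  else
    -- counts = {}; for x in nums: counts[x] = counts.get(x, 0) + 1
    let counts : PySem.Dict Int Int :=
      nums.foldl (fun d x => d.insert x (d.getD x 0 + 1)) PySem.Dict.empty
    if k = 0 then
      -- sum(1 for c in counts.values() if c >= 2)
      counts.values.foldl (fun acc c => if 2 ≤ c then acc + 1 else acc) (0 : Int)
    else
      -- sum(1 for x in counts if x + k in counts)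
      counts.keys.foldl (fun acc x => if counts.contains (x + k) then acc + 1 else acc) (0 : Int)

-- ===== PRECONDITION & SPEC =====
def Spec_findPairs1 (nums : List Int) (k : Int) (out : Int) : Prop := out = findPairs1_alt nums k
instance (nums : List Int) (k : Int) (out : Int) : Decidable (Spec_findPairs1 nums k out) := by unfold Spec_findPairs1; infer_instance

-- ===== CLAIM (what is proved, stated in full; the proofs are below) =====
def Claim_equal_findPairs1 : Prop := ∀ (nums : List Int) (k : Int), Dom_findPairs1 nums k → Spec_findPairs1 nums k (findPairs1 nums k)

-- ===== LEMMAS AND PROOFS =====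

-- 'there is a pair (i, j), i < j, with values (a, a+k)' — what A's pair list collects
def pvHit (s : List Int) (k : Int) (i : Nat) : Prop :=
  ∃ j, i < j ∧ j < s.length ∧ s.getD j 0 = s.getD i 0 + k

-- sortedness in the index form used below
def pvMono (s : List Int) : Prop :=
  ∀ i j : Nat, i ≤ j → j < s.length → s.getD i 0 ≤ s.getD j 0

lemma pvInnerA_spec (s : List Int) (k : Int) (hs : pvMono s) (pos : Nat) :
    ∀ (cnt j : Nat) (pairs : List (Int × Int)) (pn : Nat), cnt = s.length - j → pos < j →
      (∀ x, x ∈ (pvInnerA s k pos j pairs pn cnt).1 ↔ x ∈ pairs ∨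
        ((∃ j', j ≤ j' ∧ j' < s.length ∧ s.getD j' 0 = s.getD pos 0 + k) ∧
          x = (s.getD pos 0, s.getD pos 0 + k))) ∧
      ((pvInnerA s k pos j pairs pn cnt).2 = pn ∨
        (∃ j', j ≤ j' ∧ j' < s.length ∧ s.getD j' 0 = s.getD pos 0 + k ∧
          (pvInnerA s k pos j pairs pn cnt).2 = j')) := by
  intro cnt
  induction cnt with
  | zero =>
    intro j pairs pn hcnt hpj
    refine ⟨fun x => ?_, Or.inl rfl⟩
    simp only [pvInnerA]
    constructor
    · exact Or.inl
    · rintro (h | ⟨⟨j', hj1, hj2, _⟩, _⟩)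
      · exact h
      · omega
  | succ c ih =>
    intro j pairs pn hcnt hpj
    have hjn : j < s.length := by omega
    by_cases hbr : k < s.getD j 0 - s.getD pos 0
    · have hun : pvInnerA s k pos j pairs pn (c+1) = (pairs, pn) := by
        simp only [pvInnerA, if_pos hbr]
      rw [hun]
      have hnone : ¬ ∃ j', j ≤ j' ∧ j' < s.length ∧ s.getD j' 0 = s.getD pos 0 + k := by
        rintro ⟨j', h1, h2, h3⟩
        have := hs j j' h1 h2
        omega
      refine ⟨fun x => ?_, Or.inl rfl⟩
      constructor
      · exact Or.inl
      · rintro (h | ⟨hex, _⟩)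
        · exact h
        · exact absurd hex hnone
    · by_cases heq : s.getD j 0 - s.getD pos 0 = k
      · have hun : pvInnerA s k pos j pairs pn (c+1) =
            pvInnerA s k pos (j+1) (pairs ++ [(s.getD pos 0, s.getD j 0)]) j c := by
          simp only [pvInnerA, if_neg hbr, if_pos heq]
        rw [hun]
        have hv : s.getD j 0 = s.getD pos 0 + k := by omega
        obtain ⟨ihm, ihp⟩ := ih (j+1) (pairs ++ [(s.getD pos 0, s.getD j 0)]) j (by omega) (by omega)
        have hex : ∃ j', j ≤ j' ∧ j' < s.length ∧ s.getD j' 0 = s.getD pos 0 + k :=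
          ⟨j, le_refl j, hjn, hv⟩
        refine ⟨fun x => ?_, ?_⟩
        · rw [ihm x]
          simp only [List.mem_append, List.mem_singleton, hv]
          constructor
          · rintro ((h | h) | ⟨_, h⟩)
            · exact Or.inl h
            · exact Or.inr ⟨hex, h⟩
            · exact Or.inr ⟨hex, h⟩
          · rintro (h | ⟨_, h⟩)
            · exact Or.inl (Or.inl h)
            · exact Or.inl (Or.inr h)
        · rcases ihp with h | ⟨j', h1, h2, h3, h4⟩
          · exact Or.inr ⟨j, le_refl j, hjn, hv, h⟩
          · exact Or.inr ⟨j', by omega, h2, h3, h4⟩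
      · have hun : pvInnerA s k pos j pairs pn (c+1) = pvInnerA s k pos (j+1) pairs pn c := by
          simp only [pvInnerA, if_neg hbr, if_neg heq]
        rw [hun]
        have hne : s.getD j 0 ≠ s.getD pos 0 + k := by omega
        obtain ⟨ihm, ihp⟩ := ih (j+1) pairs pn (by omega) (by omega)
        have hexiff : (∃ j', j+1 ≤ j' ∧ j' < s.length ∧ s.getD j' 0 = s.getD pos 0 + k) ↔
            (∃ j', j ≤ j' ∧ j' < s.length ∧ s.getD j' 0 = s.getD pos 0 + k) := by
          constructor
          · rintro ⟨j', h1, h2, h3⟩; exact ⟨j', by omega, h2, h3⟩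
          · rintro ⟨j', h1, h2, h3⟩
            rcases Nat.eq_or_lt_of_le h1 with h | h
            · exact absurd (h ▸ h3) hne
            · exact ⟨j', h, h2, h3⟩
        refine ⟨fun x => ?_, ?_⟩
        · rw [ihm x, hexiff]
        · rcases ihp with h | ⟨j', h1, h2, h3, h4⟩
          · exact Or.inl h
          · exact Or.inr ⟨j', by omega, h2, h3, h4⟩

-- outer-loop invariant: after processing positions [0, t), pairs holds exactly the hit pairs seen so far
lemma pvOuterA_spec (s : List Int) (k : Int) (hs : pvMono s) :
    ∀ (m t : Nat) (pairs : List (Int × Int)) (pn : Nat), t + m = s.length →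
      (∀ x ∈ pairs, ∃ i, i < s.length ∧ pvHit s k i ∧ x = (s.getD i 0, s.getD i 0 + k)) →
      (∀ i, i < t → pvHit s k i → (s.getD i 0, s.getD i 0 + k) ∈ pairs) →
      (pn ≤ t ∨ (∃ p, p < t ∧ pn < s.length ∧ s.getD pn 0 = s.getD p 0 + k ∧
        (s.getD p 0, s.getD pn 0) ∈ pairs)) →
      ∀ x, x ∈ (pvOuterA s k (List.range' t m) pairs pn).1 ↔
        (∃ i, i < s.length ∧ pvHit s k i ∧ x = (s.getD i 0, s.getD i 0 + k)) := by
  intro m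
  induction m with
  | zero =>
    intro t pairs pn hn hF hC hK x
    simp only [List.range', pvOuterA]
    constructor
    · exact hF x
    · rintro ⟨i, hi, hh, hx⟩
      exact hx ▸ hC i (by omega) hh
  | succ c ih =>
    intro t pairs pn hn hF hC hK x
    have htn : t < s.length := by omega
    rw [List.range'_succ]
    simp only [pvOuterA]
    set pn1 := if pn < t then t else pn with hpn1
    have hpn1t : t ≤ pn1 := by dsimp [pn1]; split <;> omega
    set r := pvInnerA s k t (pn1+1) pairs pn1 (s.length - (pn1+1)) with hr
    obtain ⟨hm, hp⟩ := pvInnerA_spec s k hs t (s.length - (pn1+1)) (pn1+1) pairs pn1 rfl (by omega)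
    rw [← hr] at hm hp
    apply ih (t+1) r.1 r.2 (by omega)
    · -- forward invariant
      intro y hy
      rcases (hm y).1 hy with h | ⟨⟨j', hj1, hj2, hj3⟩, hyx⟩
      · exact hF y h
      · exact ⟨t, htn, ⟨j', by omega, hj2, hj3⟩, hyx⟩
    · -- coverage invariant
      intro i hi hh
      rcases Nat.lt_succ_iff_lt_or_eq.mp hi with hi' | rfl
      · exact (hm _).2 (Or.inl (hC i hi' hh))
      · obtain ⟨j, hij, hjn, hjv⟩ := hh
        by_cases hjr : pn1 + 1 ≤ j
        · exact (hm _).2 (Or.inr ⟨⟨j, hjr, hjn, hjv⟩, rfl⟩)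
        · -- j ≤ pn1: the pair was already recorded (skip-pointer invariant)
          have hjle : j ≤ pn1 := by omega
          have hpn1gt : i < pn1 := by omega
          have hpn1pn : pn1 = pn ∧ i < pn := by
            by_cases hc : pn < i
            · rw [hpn1, if_pos hc] at hpn1gt; omega
            · rw [hpn1, if_neg hc] at hpn1gt ⊢; exact ⟨rfl, hpn1gt⟩
          rcases hK with hK | ⟨p, hp1, hp2, hp3, hp4⟩
          · omega
          · have h1 : s.getD p 0 ≤ s.getD i 0 := hs p i (by omega) (by omega)
            have h2 : s.getD j 0 ≤ s.getD pn 0 := hs j pn (by omega) (by omega)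
            have hpe : s.getD p 0 = s.getD i 0 := by omega
            have hje : s.getD pn 0 = s.getD i 0 + k := by
              have := hpn1pn.1; omega
            have : (s.getD i 0, s.getD i 0 + k) = (s.getD p 0, s.getD pn 0) := by
              rw [hpe, hje]
            rw [this]
            exact (hm _).2 (Or.inl hp4)
    · -- skip-pointer invariant
      rcases hp with h | ⟨j', hj1, hj2, hj3, hj4⟩
      · rw [h]
        dsimp [pn1]
        split
        · left; omega
        · rcases hK with hK | ⟨p, hp1, hp2, hp3, hp4⟩
          · left; omega
          · exact Or.inr ⟨p, by omega, hp2, hp3, (hm _).2 (Or.inl hp4)⟩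
      · rw [hj4]
        refine Or.inr ⟨t, by omega, hj2, hj3, ?_⟩
        rw [hj3]
        exact (hm _).2 (Or.inr ⟨⟨j', hj1, hj2, hj3⟩, rfl⟩)

lemma pvPairs_mem (s : List Int) (k : Int) (hs : pvMono s) (x : Int × Int) :
    x ∈ (pvOuterA s k (List.range s.length) [] 0).1 ↔
      (∃ i, i < s.length ∧ pvHit s k i ∧ x = (s.getD i 0, s.getD i 0 + k)) := by
  rw [List.range_eq_range']
  exact pvOuterA_spec s k hs s.length 0 [] 0 (by omega) (by simp) (by omega) (Or.inl (le_refl 0)) x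

lemma pv_foldl_count {α : Type} (p : α → Prop) [DecidablePred p] (l : List α) (acc : Int) :
    l.foldl (fun acc c => if p c then acc + 1 else acc) acc
      = acc + ((l.filter (fun c => decide (p c))).length : Int) := by
  induction l generalizing acc with
  | nil => simp
  | cons y ys ih =>
    by_cases h : p y
    · simp [h, ih]; omega
    · simp [h, ih]

lemma pv_foldl_countb {α : Type} (p : α → Bool) (l : List α) (acc : Int) :
    l.foldl (fun acc c => if p c then acc + 1 else acc) acc
      = acc + ((l.filter p).length : Int) := by
  induction l generalizing acc with
  | nil => simp
  | cons y ys ih =>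
    by_cases h : p y
    · simp [h, ih]; omega
    · simp [h, ih]

-- two nodup lists with the same members have the same length
lemma pv_len_eq_of_mem_iff {α : Type} [DecidableEq α] {l l' : List α}
    (h1 : l.Nodup) (h2 : l'.Nodup) (h : ∀ x, x ∈ l ↔ x ∈ l') : l.length = l'.length :=
  ((List.perm_ext_iff_of_nodup h1 h2).2 h).length_eq

lemma pv_sorted_mono (nums : List Int) : pvMono (PySem.List.sorted nums (fun x => x) false) := by
  intro i j hij hj
  rw [List.getD_eq_getElem _ 0 (by omega), List.getD_eq_getElem _ 0 hj]
  exact PySem.List.sorted_id_getElem_mono nums hij hj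

lemma pv_mem_idx (l : List Int) (a : Int) : a ∈ l ↔ ∃ j, j < l.length ∧ l.getD j 0 = a := by
  rw [List.mem_iff_getElem]
  constructor
  · rintro ⟨i, h, he⟩; exact ⟨i, h, by rw [List.getD_eq_getElem _ 0 h]; exact he⟩
  · rintro ⟨i, h, he⟩; exact ⟨i, h, by rw [← List.getD_eq_getElem _ 0 h]; exact he⟩

-- a value has two occurrences (at an increasing index pair) iff its count is at least 2
lemma pv_two_idx_count (l : List Int) (a : Int) :
    (∃ i j, i < j ∧ j < l.length ∧ l.getD i 0 = a ∧ l.getD j 0 = a) ↔ 2 ≤ List.count a l := by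
  induction l with
  | nil =>
    constructor
    · rintro ⟨i, j, _, hj, _⟩; simp at hj
    · intro h; simp at h
  | cons b t ih =>
    rw [List.count_cons]
    constructor
    · rintro ⟨i, j, hij, hj, hi, hja⟩
      simp only [List.length_cons] at hj
      cases i with
      | zero =>
        cases j with
        | zero => omega
        | succ j' =>
          simp only [List.getD_cons_zero] at hi
          simp only [List.getD_cons_succ] at hja
          have hmem : a ∈ t := (pv_mem_idx t a).2 ⟨j', by omega, hja⟩
          have h1 : 0 < List.count a t := List.count_pos_iff.2 hmem
          simp only [hi, BEq.rfl, if_pos]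
          omega
      | succ i' =>
        cases j with
        | zero => omega
        | succ j' =>
          simp only [List.getD_cons_succ] at hi hja
          have := ih.1 ⟨i', j', by omega, by omega, hi, hja⟩
          split <;> omega
    · intro h
      by_cases hb : b = a
      · rw [if_pos (by simp [hb])] at h
        have h1 : 0 < List.count a t := by omega
        obtain ⟨j', hj', hv⟩ := (pv_mem_idx t a).1 (List.count_pos_iff.1 h1)
        exact ⟨0, j' + 1, by omega, by simp only [List.length_cons]; omega,
          by simpa using hb, by simpa using hv⟩
      · rw [if_neg (by simp [hb])] at h
        obtain ⟨i, j, hij, hj, hi, hja⟩ := ih.2 (by omega)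
        exact ⟨i + 1, j + 1, by omega, by simp only [List.length_cons]; omega,
          by simpa using hi, by simpa using hja⟩

-- counting bridge: |set(pairs)| = |filter qb (set(nums))| once qb captures the hit condition
lemma pv_count_eq (s nums : List Int) (k : Int) (hs : pvMono s) (qb : Int → Bool)
    (hq : ∀ a, (∃ i, i < s.length ∧ pvHit s k i ∧ s.getD i 0 = a) ↔ (a ∈ nums ∧ qb a = true)) :
    (PySem.Set.ofList (pvOuterA s k (List.range s.length) [] 0).1).length
      = ((PySem.Set.ofList nums).filter qb).length := by
  have hinj : Function.Injective (fun a : Int => (a, a + k)) := by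
    intro x y h
    exact (Prod.ext_iff.mp h).1
  have hlen : (PySem.Set.ofList (pvOuterA s k (List.range s.length) [] 0).1).length
      = (((PySem.Set.ofList nums).filter qb).map (fun a => (a, a + k))).length := by
    apply pv_len_eq_of_mem_iff (PySem.Set.nodup_ofList _)
      (((PySem.Set.nodup_ofList nums).filter qb).map hinj)
    intro x
    rw [PySem.Set.mem_ofList _ x, pvPairs_mem s k hs x, List.mem_map]
    constructor
    · rintro ⟨i, hi, hh, rfl⟩
      obtain ⟨hmem, hqb⟩ := (hq (s.getD i 0)).1 ⟨i, hi, hh, rfl⟩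
      exact ⟨s.getD i 0, List.mem_filter.2 ⟨(PySem.Set.mem_ofList _ _).2 hmem, hqb⟩, rfl⟩
    · rintro ⟨a, haf, rfl⟩
      obtain ⟨ha, hqb⟩ := List.mem_filter.1 haf
      obtain ⟨i, hi, hh, he⟩ := (hq a).2 ⟨(PySem.Set.mem_ofList _ _).1 ha, hqb⟩
      exact ⟨i, hi, hh, by rw [he]⟩
  rw [hlen, List.length_map]

lemma pv_main (nums : List Int) (k : Int) : findPairs1 nums k = findPairs1_alt nums k := by
  have hs := pv_sorted_mono nums
  have hperm := PySem.List.sorted_perm nums (fun x => x) false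
  set s := PySem.List.sorted nums (fun x => x) false with hsdef
  have hmemeq : ∀ a : Int, a ∈ s ↔ a ∈ nums := fun a => hperm.mem_iff
  have hA : findPairs1 nums k
      = ((PySem.Set.ofList (pvOuterA s k (List.range s.length) [] 0).1).length : Int) := rfl
  rw [hA]
  unfold findPairs1_alt
  by_cases hk : k < 0
  · rw [if_pos hk]
    have hP : (pvOuterA s k (List.range s.length) [] 0).1 = [] := by
      rw [List.eq_nil_iff_forall_not_mem]
      intro x hx
      obtain ⟨i, hi, ⟨j, hij, hj, hv⟩, _⟩ := (pvPairs_mem s k hs x).1 hx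
      have := hs i j (by omega) hj
      omega
    rw [hP, PySem.Set.ofList_nil]
    rfl
  · rw [if_neg hk]
    simp only [PySem.Dict.foldl_insert_getD_add_one_eq_counter]
    by_cases hk0 : k = 0
    · rw [if_pos hk0]
      have hq : ∀ a, (∃ i, i < s.length ∧ pvHit s k i ∧ s.getD i 0 = a) ↔
          (a ∈ nums ∧ (decide (2 ≤ (List.count a nums : Int))) = true) := by
        intro a
        constructor
        · rintro ⟨i, hi, ⟨j, hij, hj, hv⟩, rfl⟩
          have h2 : 2 ≤ List.count (s.getD i 0) s :=
            (pv_two_idx_count s _).1 ⟨i, j, hij, hj, rfl, by omega⟩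
          rw [hperm.count_eq] at h2
          refine ⟨List.count_pos_iff.1 (by omega), ?_⟩
          simp only [decide_eq_true_eq]
          exact_mod_cast h2
        · rintro ⟨ha, hqb⟩
          simp only [decide_eq_true_eq] at hqb
          have h2 : 2 ≤ List.count a s := by
            rw [hperm.count_eq]
            exact_mod_cast hqb
          obtain ⟨i, j, hij, hj, hi, hja⟩ := (pv_two_idx_count s a).2 h2
          exact ⟨i, by omega, ⟨j, hij, hj, by omega⟩, hi⟩
      have hcnt := pv_count_eq s nums k hs _ hq
      have hv : (PySem.Dict.counter nums).values
          = (PySem.Dict.counter nums).keys.map (fun a => (PySem.Dict.counter nums).getD a 0) :=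
        PySem.Dict.values_eq_map_keys _
          (by rw [PySem.Dict.keys_counter]; exact PySem.Set.nodup_ofList _) 0
      rw [hv]
      simp only [PySem.Dict.keys_counter, PySem.Dict.getD_counter]
      rw [pv_foldl_count (fun c : Int => 2 ≤ c) _ 0, List.filter_map, List.length_map]
      simp only [Function.comp_def]
      rw [hcnt]
      ring
    · rw [if_neg hk0]
      have hkpos : 0 < k := by omega
      have hq : ∀ a, (∃ i, i < s.length ∧ pvHit s k i ∧ s.getD i 0 = a) ↔
          (a ∈ nums ∧ nums.contains (a + k) = true) := by
        intro a
        constructor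
        · rintro ⟨i, hi, ⟨j, hij, hj, hv⟩, rfl⟩
          refine ⟨(hmemeq _).1 ((pv_mem_idx s _).2 ⟨i, hi, rfl⟩), ?_⟩
          rw [List.contains_iff_mem]
          exact (hmemeq _).1 ((pv_mem_idx s _).2 ⟨j, hj, hv⟩)
        · rintro ⟨ha, hc⟩
          rw [List.contains_iff_mem] at hc
          obtain ⟨i, hi, hiv⟩ := (pv_mem_idx s a).1 ((hmemeq a).2 ha)
          obtain ⟨j, hj, hjv⟩ := (pv_mem_idx s (a + k)).1 ((hmemeq (a + k)).2 hc)
          have hij : i < j := by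
            rcases lt_trichotomy i j with h | h | h
            · exact h
            · exfalso; rw [h, hjv] at hiv; omega
            · exfalso; have := hs j i (by omega) hi; omega
          exact ⟨i, hi, ⟨j, hij, hj, by omega⟩, hiv⟩
      have hcnt := pv_count_eq s nums k hs _ hq
      simp only [PySem.Dict.keys_counter, PySem.Dict.contains_counter]
      rw [pv_foldl_countb (fun x : Int => nums.contains (x + k)) _ 0, hcnt]
      ring

-- ===== VERDICT (by name: the statement is the Claim_ definition above) =====
theorem findPairs1_spec : Claim_equal_findPairs1 := by
  intro nums k _
  unfold Spec_findPairs1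
  exact pv_main nums k
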